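-- pv_equiv track=rewrite | github.com/keshy/events | src/MarkZoid/BotCleanLarge.py | getCordinates
-- ===== SOURCE A (Python) =====
-- def getCordinates(dimx, dimy, grid):
--     'basic input validation'
--     if dimx < 1 or grid == None:
--         return None;
--
--     bot = ();
--     dirtyCells = [];
--     i = 0;
--     for arr in grid:
--         if arr.__len__() != dimx:
--             return None;
--         else:
--             # get index of bot and princess
--             j = 0;
--             for ch in arr:
--                 if ch == 'b':
--                     bot = (i, j);
--                 elif ch == 'd':
--                     dirtyCells.append((i, j));
--                 j += 1;
--
--         i += 1;
--
--     return bot, dirtyCells;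
-- ===== SOURCE B (Python) =====
-- def getCordinates(dimx, dimy, grid):
--     # validation pass first, then two comprehension passes over the grid
--     if dimx < 1 or grid is None:
--         return None
--     if any(len(arr) != dimx for arr in grid):
--         return None
--     bots = [(i, j) for i, arr in enumerate(grid) for j, ch in enumerate(arr) if ch == 'b']
--     dirty = [(i, j) for i, arr in enumerate(grid) for j, ch in enumerate(arr) if ch == 'd']
--     return (bots[-1] if bots else ()), dirty
-- ===== Notes on version B (the rewrite author's own statement) =====
-- stated objective: simpler
-- what changed: A's single interleaved loop with manual i/j counters and a mutating bot/dirtyCells state is replaced by a separate validation pass followed by two enumerate-based comprehensions (bot = last element of the 'b' list).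
-- outside the precondition, e.g. on getCordinates(1, 1, ['d']): A returns ((), [(0, 0)]), B returns ((), [(0, 0)])
import Mathlib
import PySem

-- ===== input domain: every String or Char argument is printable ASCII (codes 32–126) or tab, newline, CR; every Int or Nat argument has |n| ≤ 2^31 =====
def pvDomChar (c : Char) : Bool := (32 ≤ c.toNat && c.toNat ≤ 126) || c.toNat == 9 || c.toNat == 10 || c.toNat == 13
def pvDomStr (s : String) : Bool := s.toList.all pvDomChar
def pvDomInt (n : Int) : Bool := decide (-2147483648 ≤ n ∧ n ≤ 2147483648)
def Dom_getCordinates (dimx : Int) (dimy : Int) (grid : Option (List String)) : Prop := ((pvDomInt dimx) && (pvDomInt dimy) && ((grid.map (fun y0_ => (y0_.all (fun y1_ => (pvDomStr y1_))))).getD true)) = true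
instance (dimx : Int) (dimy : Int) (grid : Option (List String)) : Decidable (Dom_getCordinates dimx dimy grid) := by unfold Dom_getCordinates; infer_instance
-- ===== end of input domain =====

-- B replaces A's interleaved validate-and-scan loop (manual i/j counters, mutated bot)
-- by a validation pass followed by two enumerate comprehensions; objective: simpler.
-- ===== PORT A =====
-- inner character loop of A: updates bot on 'b', appends to dirtyCells on 'd'
def pvGoChars (i : Int) : List Char → Int → Option (Int × Int) → List (Int × Int) →
    Option (Int × Int) × List (Int × Int)
  | [], _, bot, cells => (bot, cells)
  | ch :: t, j, bot, cells =>
    if ch = 'b' then pvGoChars i t (j + 1) (some (i, j)) cells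
    else if ch = 'd' then pvGoChars i t (j + 1) bot (cells ++ [(i, j)])
    else pvGoChars i t (j + 1) bot cells

-- outer row loop of A; Python's bot starts as the empty tuple (), modelled as
-- `none` with default (0,0) at the return — the no-'b' case is excluded by Pre_.
def pvGoRows (dimx : Int) : List String → Int → Option (Int × Int) → List (Int × Int) →
    Option ((Int × Int) × List (Int × Int))
  | [], _, bot, cells => some (bot.getD (0, 0), cells)
  | arr :: rest, i, bot, cells =>
    if PySem.Str.len arr ≠ dimx then none
    else
      let p := pvGoChars i arr.toList 0 bot cells
      pvGoRows dimx rest (i + 1) p.1 p.2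

def getCordinates (dimx : Int) (dimy : Int) (grid : Option (List String)) :
    Option ((Int × Int) × (List (Int × Int))) :=
  if dimx < 1 ∨ grid = none then none
  else
    match grid with
    | none => none
    | some g => pvGoRows dimx g 0 none []

-- ===== PORT B =====
-- [(i, j) for i, arr in enumerate(grid) for j, ch in enumerate(arr) if ch == c]
def pvCellsOf (c : Char) (g : List String) : List (Int × Int) :=
  (PySem.List.enumerate g 0).flatMap fun ia =>
    (PySem.List.enumerate ia.2.toList 0).filterMap fun jc =>
      if jc.2 = c then some (ia.1, jc.1) else none

def getCordinates_alt (dimx : Int) (dimy : Int) (grid : Option (List String)) :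
    Option ((Int × Int) × (List (Int × Int))) :=
  match grid with
  | none => none
  | some g =>
    if dimx < 1 then none
    else if g.any (fun arr => PySem.Str.len arr != dimx) then none
    else
      let bots := pvCellsOf 'b' g
      let dirty := pvCellsOf 'd' g
      -- bots[-1] if bots else (): the empty-tuple bot is not representable, that
      -- case is excluded by Pre_; default (0,0) is never reached under Pre_.
      some (bots.getLast?.getD (0, 0), dirty)

-- ===== PRECONDITION & SPEC =====
-- Pre_ excludes only the inputs where A returns normally but with the EMPTY TUPLE () as
-- bot (a fully valid grid containing no 'b'), which is not a value of the declared
-- (Int × Int) type; everywhere else A's result is claimed.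
def Pre_getCordinates (dimx : Int) (dimy : Int) (grid : Option (List String)) : Prop :=
  dimx < 1 ∨ (match grid with
    | none => true
    | some g => g.any (fun arr => PySem.Str.len arr != dimx)
        || g.any (fun arr => arr.toList.contains 'b')) = true

instance (dimx : Int) (dimy : Int) (grid : Option (List String)) :
    Decidable (Pre_getCordinates dimx dimy grid) := by unfold Pre_getCordinates; infer_instance

def pvWitness_getCordinates : Int × Int × Option (List String) := (1, 1, some ["b"])

def Spec_getCordinates (dimx : Int) (dimy : Int) (grid : Option (List String)) (out : Option ((Int × Int) × (List (Int × Int)))) : Prop := out = getCordinates_alt dimx dimy grid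
instance (dimx : Int) (dimy : Int) (grid : Option (List String)) (out : Option ((Int × Int) × (List (Int × Int)))) : Decidable (Spec_getCordinates dimx dimy grid out) := by unfold Spec_getCordinates; infer_instance

-- ===== CLAIM (what is proved, stated in full; the proofs are below) =====
def Claim_equal_getCordinates : Prop := ∀ (dimx : Int) (dimy : Int) (grid : Option (List String)), Dom_getCordinates dimx dimy grid → Pre_getCordinates dimx dimy grid → Spec_getCordinates dimx dimy grid (getCordinates dimx dimy grid)

-- ===== LEMMAS AND PROOFS =====

-- the row-level comprehension body (B's inner comprehension for one row)
def pvRowCells (c : Char) (i : Int) (l : List Char) (j : Int) : List (Int × Int) :=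
  (PySem.List.enumerate l j).filterMap fun jc => if jc.2 = c then some (i, jc.1) else none

theorem getLast?_cons_or {α : Type} (a : α) (l : List α) :
    (a :: l).getLast? = l.getLast?.or (some a) := by
  cases l with
  | nil => simp
  | cons b t => simp [List.getLast?_cons_cons, List.getLast?_cons]

theorem pvGoChars_eq (i : Int) (l : List Char) (j : Int) (bot : Option (Int × Int))
    (cells : List (Int × Int)) :
    pvGoChars i l j bot cells =
      ((pvRowCells 'b' i l j).getLast?.or bot, cells ++ pvRowCells 'd' i l j) := by
  induction l generalizing j bot cells with
  | nil => simp [pvGoChars, pvRowCells, PySem.List.enumerate_nil]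
  | cons ch t ih =>
    by_cases hb : ch = 'b'
    · subst hb
      simp [pvGoChars, pvRowCells, PySem.List.enumerate_cons, ih, getLast?_cons_or,
        Option.or_assoc]
    · by_cases hd : ch = 'd'
      · subst hd
        simp [pvGoChars, pvRowCells, PySem.List.enumerate_cons, ih, hb]
      · simp [pvGoChars, pvRowCells, PySem.List.enumerate_cons, ih, hb, hd]

-- B's whole-grid comprehension starting the row index at i
def pvCellsFrom (c : Char) (g : List String) (i : Int) : List (Int × Int) :=
  (PySem.List.enumerate g i).flatMap fun ia =>
    (PySem.List.enumerate ia.2.toList 0).filterMap fun jc =>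
      if jc.2 = c then some (ia.1, jc.1) else none

theorem pvCellsFrom_cons (c : Char) (arr : String) (g : List String) (i : Int) :
    pvCellsFrom c (arr :: g) i = pvRowCells c i arr.toList 0 ++ pvCellsFrom c g (i + 1) := by
  simp [pvCellsFrom, pvRowCells, PySem.List.enumerate_cons]

theorem pvGoRows_bad (dimx : Int) (g : List String) (i : Int) (bot : Option (Int × Int))
    (cells : List (Int × Int)) (h : ∃ arr ∈ g, PySem.Str.len arr ≠ dimx) :
    pvGoRows dimx g i bot cells = none := by
  induction g generalizing i bot cells with
  | nil => simp at h
  | cons arr rest ih =>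
    by_cases ha : PySem.Str.len arr ≠ dimx
    · simp only [pvGoRows]
      rw [if_pos ha]
    · have hrest : ∃ a ∈ rest, PySem.Str.len a ≠ dimx := by
        obtain ⟨a, hmem, hne⟩ := h
        rcases List.mem_cons.mp hmem with heq | hmem'
        · exact absurd (heq ▸ hne) ha
        · exact ⟨a, hmem', hne⟩
      simp only [pvGoRows]
      rw [if_neg ha]
      exact ih _ _ _ hrest

theorem pvGoRows_good (dimx : Int) (g : List String) (i : Int) (bot : Option (Int × Int))
    (cells : List (Int × Int)) (h : ∀ arr ∈ g, PySem.Str.len arr = dimx) :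
    pvGoRows dimx g i bot cells =
      some (((pvCellsFrom 'b' g i).getLast?.or bot).getD (0, 0),
            cells ++ pvCellsFrom 'd' g i) := by
  induction g generalizing i bot cells with
  | nil => simp [pvGoRows, pvCellsFrom, PySem.List.enumerate_nil]
  | cons arr rest ih =>
    have ha : PySem.Str.len arr = dimx := h arr (by simp)
    have hrest : ∀ a ∈ rest, PySem.Str.len a = dimx := fun a ha' => h a (by simp [ha'])
    simp only [pvGoRows]
    rw [if_neg (not_ne_iff.mpr ha)]
    simp only [pvGoChars_eq, ih _ _ _ hrest, pvCellsFrom_cons]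
    rw [List.getLast?_append, List.append_assoc]
    simp [Option.or_assoc]

theorem pvCellsFrom_zero (c : Char) (g : List String) :
    pvCellsFrom c g 0 = pvCellsOf c g := rfl

-- ===== VERDICT (by name: the statement is the Claim_ definition above) =====
theorem getCordinates_spec : Claim_equal_getCordinates := by
  intro dimx dimy grid _ _
  unfold Spec_getCordinates getCordinates getCordinates_alt
  by_cases hx : dimx < 1
  · cases grid <;> simp [hx]
  · cases grid with
    | none => simp
    | some g =>
      rw [if_neg (show ¬(dimx < 1 ∨ (some g : Option (List String)) = none) by simp [hx])]
      show pvGoRows dimx g 0 none [] =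
        if dimx < 1 then none
        else if (g.any fun arr => PySem.Str.len arr != dimx) = true then none
        else some ((pvCellsOf 'b' g).getLast?.getD (0, 0), pvCellsOf 'd' g)
      rw [if_neg hx]
      by_cases hbad : ∃ arr ∈ g, PySem.Str.len arr ≠ dimx
      · have : g.any (fun arr => PySem.Str.len arr != dimx) = true := by
          rcases hbad with ⟨a, hm, hne⟩
          exact List.any_eq_true.mpr ⟨a, hm, bne_iff_ne.mpr hne⟩
        rw [if_pos this, pvGoRows_bad dimx g 0 none [] hbad]
      · have hgood : ∀ arr ∈ g, PySem.Str.len arr = dimx := by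
          intro a hm
          by_contra hne
          exact hbad ⟨a, hm, hne⟩
        have hany : g.any (fun arr => PySem.Str.len arr != dimx) = false := by
          simp only [List.any_eq_false, bne_iff_ne, ne_eq, not_not]
          exact hgood
        rw [hany, if_neg (by simp), pvGoRows_good dimx g 0 none [] hgood]
        simp [pvCellsFrom_zero]
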